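-- pv_equiv track=rewrite | github.com/RodrigoMaroto/AdventOfCode | solutions/2025/day_03/solution.py | calculate_joltage
-- ===== SOURCE A (Python) =====
-- def calculate_joltage(bank: list[int], digits: int) -> int:
--     joltage = 0
--     batteries = bank.copy()
--     for digit in range(digits, 1, -1):
--         selected = max(batteries[:-digit + 1])
--         joltage += selected * (10 ** (digit-1))
--         batteries = batteries[batteries.index(selected)+1:]
--     joltage += max(batteries)
--     return joltage
-- ===== SOURCE B (Python) =====
-- def calculate_joltage(bank: list[int], digits: int) -> int:
--     # Monotonic-stack selection of the greedy (lexicographically greatest)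
--     # length-k subsequence in one pass, then Horner evaluation.
--     k = digits if digits > 1 else 1
--     drops = len(bank) - k  # elements we may discard
--     stack = []
--     for x in bank:
--         while stack and stack[-1] < x and drops > 0:
--             stack.pop()
--             drops -= 1
--         stack.append(x)
--     value = 0
--     for d in stack[:k]:
--         value = value * 10 + d
--     return value
-- ===== Notes on version B (the rewrite author's own statement) =====
-- stated objective: faster
-- what changed: Replaced the per-digit rescan (max of a shrinking prefix + list.index + slicing each round) by a single-pass monotonic-stack selection of the greedy length-k subsequence, evaluated by Horner's rule.
import Mathlib
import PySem

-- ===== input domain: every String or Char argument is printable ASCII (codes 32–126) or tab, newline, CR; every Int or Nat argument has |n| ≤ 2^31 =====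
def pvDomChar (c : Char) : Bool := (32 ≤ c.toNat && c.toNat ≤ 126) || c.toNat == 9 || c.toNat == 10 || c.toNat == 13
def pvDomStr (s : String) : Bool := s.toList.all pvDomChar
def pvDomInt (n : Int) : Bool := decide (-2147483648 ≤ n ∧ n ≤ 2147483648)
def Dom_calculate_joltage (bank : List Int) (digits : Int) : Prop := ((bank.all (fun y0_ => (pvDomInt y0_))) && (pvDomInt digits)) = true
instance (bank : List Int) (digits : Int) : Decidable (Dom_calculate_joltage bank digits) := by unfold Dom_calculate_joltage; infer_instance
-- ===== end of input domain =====

-- B replaces A's per-digit rescan (max of a shrinking prefix + index + slice each round)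
-- by a one-pass monotonic-stack selection of the same greedy subsequence (objective: faster).

-- ===== PORT A =====
-- loop body of A's 'for digit in range(digits, 1, -1)': state = (joltage, batteries),
-- none = a raised exception (max of an empty slice) propagated.
def calcStepA (st : Option (Int × List Int)) (digit : Int) : Option (Int × List Int) :=
  match st with
  | none => none
  | some (joltage, batteries) =>
    match PySem.List.max? (PySem.List.slice batteries none (some (-digit + 1))) (fun y => y) with
    | none => none
    | some selected =>
      match PySem.List.index? batteries selected with
      | none => none
      | some i =>
        -- 10 ** (digit-1): in the loop digit ≥ 2, so the .toNat exponent is exact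
        some (joltage + selected * 10 ^ (digit - 1).toNat,
              PySem.List.slice batteries (some ((i : Int) + 1)) none)

-- final 'joltage += max(batteries); return joltage' (none/empty = raised; junk 0 outside Pre_)
def finishA (st : Option (Int × List Int)) : Int :=
  match st with
  | none => 0
  | some (joltage, batteries) =>
    match PySem.List.max? batteries (fun y => y) with
    | none => 0
    | some m => joltage + m

def calculate_joltage (bank : List Int) (digits : Int) : Int :=
  finishA ((PySem.List.pyRange digits 1 (-1)).foldl calcStepA (some (0, bank)))

-- ===== PORT B =====
-- Python's stack (top at the end) is ported with the top at the HEAD of the list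
-- (push/pop at the head); hence the final reverse before stack[:k].
-- the inner 'while stack and stack[-1] < x and drops > 0: stack.pop(); drops -= 1'
def popB : List Int → Int → Int → List Int × Int
  | [], _, d => ([], d)
  | t :: s, x, d => if t < x ∧ d > 0 then popB s x (d - 1) else (t :: s, d)

def stepB (sd : List Int × Int) (x : Int) : List Int × Int :=
  let p := popB sd.1 x sd.2
  (x :: p.1, p.2)

def calculate_joltage_alt (bank : List Int) (digits : Int) : Int :=
  let k : Int := if digits > 1 then digits else 1
  let sd := bank.foldl stepB ([], (bank.length : Int) - k)
  (PySem.List.slice sd.1.reverse none (some k)).foldl (fun v d => v * 10 + d) 0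

-- ===== PRECONDITION & SPEC =====
-- Pre_ excludes exactly the inputs on which A raises ValueError (max of an empty
-- sequence): empty bank, or digits ≥ 2 with fewer than digits batteries.
def Pre_calculate_joltage (bank : List Int) (digits : Int) : Prop :=
  bank ≠ [] ∧ (2 ≤ digits → digits ≤ (bank.length : Int))
instance (bank : List Int) (digits : Int) : Decidable (Pre_calculate_joltage bank digits) := by
  unfold Pre_calculate_joltage; infer_instance

def pvWitness_calculate_joltage : List Int × Int := ([3, 1, 2], 2)

def Spec_calculate_joltage (bank : List Int) (digits : Int) (out : Int) : Prop := out = calculate_joltage_alt bank digits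
instance (bank : List Int) (digits : Int) (out : Int) : Decidable (Spec_calculate_joltage bank digits out) := by unfold Spec_calculate_joltage; infer_instance

-- ===== CLAIM (what is proved, stated in full; the proofs are below) =====
def Claim_equal_calculate_joltage : Prop := ∀ (bank : List Int) (digits : Int), Dom_calculate_joltage bank digits → Pre_calculate_joltage bank digits → Spec_calculate_joltage bank digits (calculate_joltage bank digits)

-- ===== LEMMAS AND PROOFS =====

-- the common reference: greedy leftmost-max selection of a length-k subsequence
def greedy : Nat → List Int → List Int
  | 0, _ => []
  | k+1, l =>
    match PySem.List.max? (l.take (l.length - k)) (fun y => y) with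
    | none => []
    | some m =>
      match PySem.List.index? l m with
      | none => []
      | some i => m :: greedy k (l.drop (i + 1))

def horner (l : List Int) : Int := l.foldl (fun v d => v * 10 + d) 0

theorem horner_shift (l : List Int) : ∀ a : Int, l.foldl (fun v d => v * 10 + d) a = a * 10 ^ l.length + horner l := by
  induction l with
  | nil => intro a; simp [horner]
  | cons x t ih =>
    intro a
    simp only [List.foldl_cons, horner, List.length_cons]
    rw [ih (a * 10 + x), ih (0 * 10 + x)]
    ring

theorem sel_spec (l : List Int) (t : Nat) (h1 : 1 ≤ t) (h2 : t ≤ l.length) :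
    ∃ m i, PySem.List.max? (l.take t) (fun y => y) = some m ∧
      PySem.List.index? l m = some i ∧ i < t ∧
      l = l.take i ++ m :: l.drop (i + 1) ∧
      (∀ j, (hj : j < l.length) → j < t → l[j] ≤ m) ∧
      (∀ x ∈ l.take i, x < m) := by
  have hlne : l ≠ [] := by intro h; subst h; simp at h2; omega
  have htne : l.take t ≠ [] := by
    simp [List.take_eq_nil_iff]
    constructor
    · omega
    · exact hlne
  obtain ⟨m, hmax⟩ : ∃ m, PySem.List.max? (l.take t) (fun y => y) = some m := by
    cases hm : PySem.List.max? (l.take t) (fun y => y) with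
    | none => exact absurd ((PySem.List.max?_eq_none_iff _ _).mp hm) htne
    | some m => exact ⟨m, rfl⟩
  have hm_take : m ∈ l.take t := PySem.List.max?_mem hmax
  have hm_l : m ∈ l := List.mem_of_mem_take hm_take
  obtain ⟨i, hidx⟩ : ∃ i, PySem.List.index? l m = some i := by
    cases hi : PySem.List.index? l m with
    | none => exact absurd ((PySem.List.index?_eq_none_iff _ _).mp hi) (not_not_intro hm_l)
    | some i => exact ⟨i, rfl⟩
  obtain ⟨hi_lt, hli, hfirst⟩ := PySem.List.getElem_of_index?_eq_some hidx
  -- occurrence inside the prefix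
  obtain ⟨j0, hj0lt, hj0⟩ := List.mem_iff_getElem.mp hm_take
  have hj0t : j0 < t := by have := hj0lt; simp at this; omega
  have hj0l : j0 < l.length := by have := hj0lt; simp at this; omega
  have hj0val : l[j0] = m := by rw [List.getElem_take] at hj0; exact hj0
  have hit : i < t := by
    by_contra hit
    exact hfirst j0 (by omega) hj0val
  have hbound : ∀ j, (hj : j < l.length) → j < t → l[j] ≤ m := by
    intro j hj hjt
    have hmem : l[j] ∈ l.take t := by
      rw [List.mem_iff_getElem]
      exact ⟨j, by simp; omega, by rw [List.getElem_take]⟩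
    exact PySem.List.max?_isMax hmax _ hmem
  refine ⟨m, i, hmax, hidx, hit, ?_, hbound, ?_⟩
  · conv_lhs => rw [← List.take_append_drop i l]
    congr 1
    rw [← hli]
    exact (List.getElem_cons_drop hi_lt).symm
  · intro x hx
    obtain ⟨j, hjlt, hjx⟩ := List.mem_iff_getElem.mp hx
    have hji : j < i := by simp at hjlt; omega
    have hjl : j < l.length := by omega
    have hxval : l[j] = x := by
      rw [List.getElem_take] at hjx; exact hjx
    have hne : l[j] ≠ m := hfirst j hji
    have hle : l[j] ≤ m := hbound j hjl (by omega)
    rw [← hxval]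
    omega

theorem greedy_length (k : Nat) : ∀ (l : List Int), 1 ≤ k → k ≤ l.length →
    (greedy k l).length = k := by
  induction k with
  | zero => intro l h1 h2; omega
  | succ k ih =>
    intro l _ h2
    obtain ⟨m, i, hmax, hidx, hit, _, _, _⟩ :=
      sel_spec l (l.length - k) (by omega) (by omega)
    simp only [greedy, hmax, hidx, List.length_cons]
    rcases Nat.eq_zero_or_pos k with hk | hk
    · subst hk; simp [greedy]
    · rw [ih (l.drop (i + 1)) hk (by simp; omega)]

theorem lemA (k : Nat) : ∀ (l : List Int) (j : Int), 1 ≤ k → k ≤ l.length →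
    finishA ((PySem.List.pyRange (k : Int) 1 (-1)).foldl calcStepA (some (j, l)))
      = j + horner (greedy k l) := by
  induction k with
  | zero => intro l j h1 h2; omega
  | succ k ih =>
    intro l j _ h2
    obtain ⟨m, i, hmax, hidx, hit, _, _, _⟩ :=
      sel_spec l (l.length - k) (by omega) (by omega)
    rcases Nat.eq_zero_or_pos k with hk | hk
    · -- k+1 = 1 : the range is empty, the final max is taken
      subst hk
      rw [PySem.List.pyRange_neg_one_eq_nil (by norm_num)]
      simp only [List.foldl_nil, finishA]
      have hmaxl : PySem.List.max? l (fun y => y) = some m := by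
        simpa using hmax
      have hidx' : List.idxOf? m l = some i := by
        rw [← PySem.List.index?_eq_idxOf?]; exact hidx
      rw [hmaxl]
      simp [greedy, hmaxl, hidx', horner]
    · -- k+1 ≥ 2 : one loop iteration, then the induction hypothesis
      rw [PySem.List.pyRange_neg_one_cons (by omega)]
      simp only [List.foldl_cons]
      have hstep : calcStepA (some (j, l)) ((k + 1 : Nat) : Int)
          = some (j + m * 10 ^ k, l.drop (i + 1)) := by
        have hneg : (-(((k + 1 : Nat) : Int)) + 1) = -((k : Nat) : Int) := by push_cast; ring
        have hexp : ((((k + 1 : Nat) : Int)) - 1).toNat = k := by omega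
        simp only [calcStepA, hneg, PySem.List.slice_to_neg_natCast l k hk, hmax, hidx, hexp,
          PySem.List.slice_from l (a := (i : Int) + 1) (by omega)]
        have htn : ((i : Int) + 1).toNat = i + 1 := by omega
        rw [htn]
      have hrange : ((((k+1 : Nat)) : Int) - 1) = ((k : Nat) : Int) := by push_cast; ring
      rw [hstep, hrange, ih (l.drop (i + 1)) (j + m * 10 ^ k) hk (by simp; omega)]
      simp only [greedy, hmax, hidx]
      have hlen := greedy_length k (l.drop (i+1)) hk (by simp; omega)
      have hh : horner (m :: greedy k (l.drop (i+1)))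
          = m * 10 ^ k + horner (greedy k (l.drop (i+1))) := by
        show (m :: greedy k (l.drop (i+1))).foldl (fun v d => v * 10 + d) 0 = _
        rw [List.foldl_cons, horner_shift, hlen]
        ring
      rw [hh]
      ring

def stackSel (k : Nat) (l : List Int) : List Int :=
  ((l.foldl stepB ([], (l.length : Int) - k)).1.reverse).take k

theorem popB_spec (x : Int) : ∀ (s : List Int) (d : Int),
    (popB s x d).1.length ≤ s.length ∧
    (popB s x d).2 = d - ((s.length : Int) - (popB s x d).1.length) := by
  intro s
  induction s with
  | nil => intro d; simp [popB]
  | cons t s ih =>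
    intro d
    obtain ⟨h1, h2⟩ := ih (d - 1)
    by_cases h : t < x ∧ d > 0
    · simp only [popB, if_pos h, List.length_cons]
      push_cast
      omega
    · simp [popB, if_neg h]

theorem popB_subset (x : Int) : ∀ (s : List Int) (d : Int) (y : Int),
    y ∈ (popB s x d).1 → y ∈ s := by
  intro s
  induction s with
  | nil => intro d y h; simpa [popB] using h
  | cons t s ih =>
    intro d y h
    by_cases hc : t < x ∧ d > 0
    · simp only [popB, if_pos hc] at h
      exact List.mem_cons_of_mem _ (ih _ _ h)
    · simpa [popB, if_neg hc] using h

theorem popB_all (x : Int) : ∀ (s : List Int) (d : Int), (∀ y ∈ s, y < x) →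
    ((s.length : Int) ≤ d) → popB s x d = ([], d - s.length) := by
  intro s
  induction s with
  | nil => intro d _ _; simp [popB]
  | cons t s ih =>
    intro d hall hd
    have hc : t < x ∧ d > 0 := ⟨hall t (by simp), by simp at hd; omega⟩
    simp only [popB, if_pos hc]
    rw [ih (d - 1) (fun y hy => hall y (by simp [hy])) (by simp at hd ⊢; omega)]
    congr 1
    simp
    omega

theorem popB_append (x m : Int) : ∀ (s : List Int) (d : Int),
    ((s.length : Int) < d → x ≤ m) →
    popB (s ++ [m]) x d = ((popB s x d).1 ++ [m], (popB s x d).2) := by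
  intro s
  induction s with
  | nil =>
    intro d h
    by_cases hd : d > 0
    · have hxm : ¬ (m < x ∧ d > 0) := by
        have := h (by simpa using hd)
        omega
      simp [popB, if_neg hxm]
    · simp [popB, hd]
  | cons t s ih =>
    intro d h
    by_cases hc : t < x ∧ d > 0
    · simp only [List.cons_append, popB, if_pos hc]
      exact ih (d - 1) (by intro hlt; exact h (by simp at hlt ⊢; omega))
    · simp [popB, if_neg hc]

theorem lemB_protect (m : Int) : ∀ (l s : List Int) (d : Int),
    (∀ j, (hj : j < l.length) → ((j : Int) + s.length) < d → l[j] ≤ m) →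
    l.foldl stepB (s ++ [m], d)
      = ((l.foldl stepB (s, d)).1 ++ [m], (l.foldl stepB (s, d)).2) := by
  intro l
  induction l with
  | nil => intro s d _; simp
  | cons x l ih =>
    intro s d h
    have hstep : stepB (s ++ [m], d) x
        = ((stepB (s, d) x).1 ++ [m], (stepB (s, d) x).2) := by
      simp only [stepB]
      rw [popB_append x m s d (fun hlt => h 0 (by simp) (by simpa using hlt))]
      simp
    simp only [List.foldl_cons, hstep]
    obtain ⟨hlen, hbud⟩ := popB_spec x s d
    refine ih _ _ ?_
    intro j hj hjd
    refine h (j + 1) (by simpa using hj) ?_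
    simp only [stepB] at hjd ⊢
    simp only [List.length_cons] at hjd
    push_cast at hjd ⊢
    omega

theorem lemB_prefix (m : Int) : ∀ (pre s : List Int) (d : Int),
    (∀ y ∈ s, y < m) → (∀ y ∈ pre, y < m) →
    (∀ y ∈ (pre.foldl stepB (s, d)).1, y < m) ∧
    ((pre.foldl stepB (s, d)).1.length : Int) - (pre.foldl stepB (s, d)).2
      = (s.length : Int) - d + pre.length := by
  intro pre
  induction pre with
  | nil => intro s d hs _; exact ⟨hs, by simp⟩
  | cons x pre ih =>
    intro s d hs hp
    have hx : x < m := hp x (by simp)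
    obtain ⟨hlen, hbud⟩ := popB_spec x s d
    have hsub := popB_subset x s d
    simp only [List.foldl_cons]
    have h1 : ∀ y ∈ (stepB (s, d) x).1, y < m := by
      intro y hy
      simp only [stepB] at hy
      rcases List.mem_cons.mp hy with h | h
      · subst h; exact hx
      · exact hs y (hsub y h)
    obtain ⟨ha, hb⟩ := ih (stepB (s, d) x).1 (stepB (s, d) x).2 h1
      (fun y hy => hp y (by simp [hy]))
    refine ⟨ha, ?_⟩
    rw [hb]
    simp only [stepB, List.length_cons]
    push_cast
    omega

theorem lemB (k : Nat) : ∀ (l : List Int), k ≤ l.length →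
    stackSel k l = greedy k l := by
  induction k with
  | zero => intro l _; simp [stackSel, greedy]
  | succ k ih =>
    intro l h2
    obtain ⟨m, i, hmax, hidx, hit, hdec, hbound, hpre⟩ :=
      sel_spec l (l.length - k) (by omega) (by omega)
    have hil : i < l.length := by omega
    have hplen : (l.take i).length = i := by simp; omega
    set d : Int := (l.length : Int) - (k + 1) with hd
    set rest := l.drop (i + 1) with hrest
    have hrlen : rest.length = l.length - (i + 1) := by simp [hrest]
    -- run the fold over l = take i l ++ m :: rest
    have hsplit : l.foldl stepB ([], d) = rest.foldl stepB ([m], d - i) := by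
      conv_lhs => rw [hdec]
      rw [List.foldl_append, List.foldl_cons]
      obtain ⟨hall, hbal⟩ := lemB_prefix m (l.take i) [] d (by simp) hpre
      set st := ((l.take i).foldl stepB ([], d)) with hst
      have hslen : (st.1.length : Int) - st.2 = -d + i := by
        have := hbal; rw [hplen] at this; simpa using this
      have hstle : (st.1.length : Int) ≤ st.2 := by omega
      have hpop : stepB st m = ([m], d - i) := by
        simp only [stepB]
        have heq : st.2 - (st.1.length : Int) = d - i := by omega
        rw [popB_all m st.1 st.2 hall hstle, heq]
      rw [hpop]
    have hcond : ∀ j, (hj : j < rest.length) → ((j : Int) + ([] : List Int).length) < d - i → rest[j] ≤ m := by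
      intro j hj hjd
      have : rest[j] = l[i + 1 + j]'(by omega) := by
        simp [hrest, List.getElem_drop]
      rw [this]
      refine hbound (i + 1 + j) (by omega) ?_
      simp at hjd
      omega
    have hprot := lemB_protect m rest [] (d - i) hcond
    simp only [List.nil_append] at hprot
    have hbudget : d - i = (rest.length : Int) - k := by
      rw [hrlen]; push_cast; omega
    have hfold : (l.foldl stepB ([], d)).1
        = (rest.foldl stepB ([], (rest.length : Int) - k)).1 ++ [m] := by
      rw [hsplit, hprot, ← hbudget]
    -- assemble
    have : stackSel (k + 1) l = m :: stackSel k rest := by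
      unfold stackSel
      have hdd : (l.length : Int) - ((k + 1 : Nat) : Int) = d := by rw [hd]; push_cast; ring
      rw [hdd, hfold]
      simp [List.reverse_append]
    rw [this, ih rest (by omega)]
    simp only [greedy, hmax, hidx]
    rw [hrest]

-- ===== VERDICT (by name: the statement is the Claim_ definition above) =====
theorem altB (bank : List Int) (digits : Int) (k : Nat)
    (hk : (if digits > 1 then digits else 1) = (k : Int)) :
    calculate_joltage_alt bank digits = horner (stackSel k bank) := by
  simp only [calculate_joltage_alt, hk]
  rw [PySem.List.slice_to _ (by omega)]
  simp only [Int.toNat_natCast]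
  rfl

theorem calculate_joltage_spec : Claim_equal_calculate_joltage := by
  intro bank digits _ hpre
  obtain ⟨hne, hdig⟩ := hpre
  unfold Spec_calculate_joltage
  have hlen1 : 1 ≤ bank.length := List.length_pos_of_ne_nil hne
  by_cases hd2 : 2 ≤ digits
  · have hdl : digits ≤ (bank.length : Int) := hdig hd2
    set k : Nat := digits.toNat with hk
    have hkc : (k : Int) = digits := by omega
    have hkl : k ≤ bank.length := by omega
    have hA : calculate_joltage bank digits = horner (greedy k bank) := by
      unfold calculate_joltage
      rw [← hkc, lemA k bank 0 (by omega) hkl]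
      ring
    rw [hA, altB bank digits k (by rw [if_pos (show digits > 1 by omega)]; omega),
      lemB k bank hkl]
  · have hA : calculate_joltage bank digits = horner (greedy 1 bank) := by
      unfold calculate_joltage
      rw [PySem.List.pyRange_neg_one_eq_nil (show digits ≤ 1 by omega)]
      have h1 := lemA 1 bank 0 (by omega) hlen1
      rw [show ((1 : Nat) : Int) = (1 : Int) by norm_num,
        PySem.List.pyRange_neg_one_eq_nil (by norm_num)] at h1
      simpa using h1
    rw [hA, altB bank digits 1 (by rw [if_neg (show ¬ digits > 1 by omega)]; norm_num),
      lemB 1 bank hlen1]
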